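-- pv_equiv track=rewrite | github.com/fabiosangregorio/scripts | anki_format/anki_format.py | anki_format
-- ===== SOURCE A (Python) =====
-- def anki_format(input):
--     splitted = input.split("$")
--     output = ""
--     for index, substring in enumerate(splitted):
--         if index == len(splitted) - 1:
--             delimiter = ""
--         elif index % 2 == 0:
--             delimiter = "[$]"
--         else:
--             delimiter = "[/$]"
--         output += substring + delimiter
--     return output
-- ===== SOURCE B (Python) =====
-- def anki_format(input):
--     out = []
--     opening = True
--     for ch in input:
--         if ch == "$":
--             out.append("[$]" if opening else "[/$]")
--             opening = not opening
--         else: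
--             out.append(ch)
--     return "".join(out)
-- ===== Notes on version B (the rewrite author's own statement) =====
-- stated objective: simpler
-- what changed: Replaces split('$')+enumerate with index/parity/last-piece bookkeeping by a single character scan that appends an alternating [$]/[/$] marker (boolean toggle) at each '$' and copies every other character.
import Mathlib
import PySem

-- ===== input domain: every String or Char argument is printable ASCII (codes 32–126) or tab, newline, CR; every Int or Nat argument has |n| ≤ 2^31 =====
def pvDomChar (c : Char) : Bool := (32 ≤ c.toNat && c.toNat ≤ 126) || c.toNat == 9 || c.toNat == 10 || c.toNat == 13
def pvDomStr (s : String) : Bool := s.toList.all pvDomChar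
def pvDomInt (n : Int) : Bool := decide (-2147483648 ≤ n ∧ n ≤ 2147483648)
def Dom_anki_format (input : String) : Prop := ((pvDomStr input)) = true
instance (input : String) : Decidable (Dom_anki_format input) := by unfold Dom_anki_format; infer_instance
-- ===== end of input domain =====

-- B replaces split('$') + enumerate-with-parity/last-piece bookkeeping by one character
-- scan with a boolean toggle appending alternating [$]/[/$] markers (objective: simpler).


-- ===== PORT A =====
-- splitted = input.split("$"); for index, substring in enumerate(splitted): … output += substring + delimiter
def anki_format (input : String) : String :=
  let splitted := PySem.Chars.splitOn input.toList ['$']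
  let output := (PySem.List.enumerate splitted).foldl
    (fun out p =>
      let delimiter : List Char :=
        if p.1 = (splitted.length : Int) - 1 then []
        else if PySem.Int.mod p.1 2 = 0 then ['[', '$', ']']
        else ['[', '/', '$', ']']
      out ++ p.2 ++ delimiter) []
  String.mk output

-- ===== PORT B =====
-- single scan over the characters with a boolean toggle
def ankiAltGo : List Char → Bool → List Char
  | [], _ => []
  | c :: cs, t =>
    if c = '$' then
      (if t then ['[', '$', ']'] else ['[', '/', '$', ']']) ++ ankiAltGo cs (!t)
    else c :: ankiAltGo cs t

def anki_format_alt (input : String) : String :=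
  String.mk (ankiAltGo input.toList true)

-- ===== PRECONDITION & SPEC =====
def Spec_anki_format (input : String) (out : String) : Prop := out = anki_format_alt input
instance (input : String) (out : String) : Decidable (Spec_anki_format input out) := by unfold Spec_anki_format; infer_instance

-- ===== CLAIM (what is proved, stated in full; the proofs are below) =====
def Claim_equal_anki_format : Prop := ∀ (input : String), Dom_anki_format input → Spec_anki_format input (anki_format input)

-- ===== LEMMAS AND PROOFS =====

-- reference split on a single '$' separator
def sp : List Char → List (List Char)
  | [] => [[]]
  | c :: cs => if c = '$' then [] :: sp cs
               else match sp cs with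
                    | [] => [[c]]
                    | h :: t => (c :: h) :: t

-- prepend a prefix onto the first piece
def consHead (p : List Char) : List (List Char) → List (List Char)
  | [] => [p]
  | h :: t => (p ++ h) :: t

theorem sp_ne_nil (cs : List Char) : sp cs ≠ [] := by
  cases cs with
  | nil => simp [sp]
  | cons c cs =>
    simp only [sp]
    split
    · simp
    · split <;> simp_all

theorem go_eq (fuel : Nat) (l cur acc : List Char) (aacc : List (List Char))
    (h : l.length < fuel) :
    PySem.Chars.splitOn.go ['$'] fuel l cur aacc =
      aacc.reverse ++ consHead cur.reverse (sp l) := by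
  induction fuel generalizing l cur aacc with
  | zero => omega
  | succ fuel ih =>
    cases l with
    | nil => simp [PySem.Chars.splitOn.go, sp, consHead]
    | cons c rest =>
      by_cases hc : c = '$'
      · subst hc
        have hpre : List.isPrefixOf ['$'] ('$' :: rest) = true := by
          simp [List.isPrefixOf]
        simp only [PySem.Chars.splitOn.go, hpre, if_pos, List.length_singleton,
          List.drop_succ_cons, List.drop_zero]
        rw [ih rest [] (cur.reverse :: aacc) (by simpa using Nat.lt_of_succ_lt_succ h)]
        rcases hsp : sp rest with _ | ⟨h0, t0⟩
        · exact absurd hsp (sp_ne_nil rest)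
        · simp [sp, consHead, hsp]
      · have hpre : List.isPrefixOf ['$'] (c :: rest) = false := by
          simp [List.isPrefixOf]
          exact fun h' => hc h'.symm
        simp only [PySem.Chars.splitOn.go, hpre, Bool.false_eq_true, if_false]
        rw [ih rest (c :: cur) aacc (by simpa using Nat.lt_of_succ_lt_succ h)]
        rcases hsp : sp rest with _ | ⟨h0, t0⟩
        · exact absurd hsp (sp_ne_nil rest)
        · simp [sp, consHead, hsp, hc]

theorem splitOn_eq_sp (cs : List Char) : PySem.Chars.splitOn cs ['$'] = sp cs := by
  unfold PySem.Chars.splitOn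
  rw [go_eq (cs.length + 1) cs [] [] [] (by omega)]
  rcases hsp : sp cs with _ | ⟨h0, t0⟩
  · exact absurd hsp (sp_ne_nil cs)
  · simp [consHead]

-- the value A's loop appends after the piece at index i (n pieces in total)
def delimA (n i : Int) : List Char :=
  if i = n - 1 then []
  else if PySem.Int.mod i 2 = 0 then ['[', '$', ']']
  else ['[', '/', '$', ']']

-- A's loop, written as a recursion over the pieces carrying the running index
def joinIdx (n : Int) : Int → List (List Char) → List Char
  | _, [] => []
  | i, p :: ps => p ++ delimA n i ++ joinIdx n (i + 1) ps

theorem foldl_enum_eq_joinIdx (n : Int) (ps : List (List Char)) :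
    ∀ (i : Int) (acc : List Char),
    (PySem.List.enumerate ps i).foldl
      (fun out p => out ++ p.2 ++ delimA n p.1) acc = acc ++ joinIdx n i ps := by
  induction ps with
  | nil => intro i acc; simp [PySem.List.enumerate, joinIdx]
  | cons p ps ih =>
    intro i acc
    simp only [PySem.List.enumerate, List.foldl_cons]
    rw [ih (i + 1)]
    simp [joinIdx, List.append_assoc]

-- B's output described on the pieces: alternate markers, none after the last piece
def joinAlt : List (List Char) → Bool → List Char
  | [], _ => []
  | [p], _ => p
  | p :: ps, t => p ++ (if t then ['[', '$', ']'] else ['[', '/', '$', ']']) ++ joinAlt ps (!t)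

theorem joinIdx_eq_joinAlt (n : Int) (ps : List (List Char)) :
    ∀ (i : Int), 0 ≤ i → i + ps.length = n →
    joinIdx n i ps = joinAlt ps (i % 2 = 0) := by
  induction ps with
  | nil => intro i _ _; simp [joinIdx, joinAlt]
  | cons p ps ih =>
    intro i hi hn
    cases ps with
    | nil =>
      have : i = n - 1 := by simp at hn; omega
      simp [joinIdx, joinAlt, delimA, this]
    | cons q qs =>
      have hne : ¬ (i = n - 1) := by
        simp [List.length_cons] at hn; omega
      have hmod : PySem.Int.mod i 2 = i % 2 := PySem.Int.mod_eq_emod_of_pos (by omega)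
      rw [joinIdx, ih (i + 1) (by omega) (by simp at hn ⊢; omega)]
      simp only [joinAlt, delimA, hne, if_false, hmod]
      by_cases hp : i % 2 = 0
      · have hp' : (i + 1) % 2 = 1 := by omega
        simp [hp, hp']
      · have hp' : (i + 1) % 2 = 0 := by omega
        simp [hp, hp']

theorem altGo_eq_joinAlt (cs : List Char) : ∀ (t : Bool),
    ankiAltGo cs t = joinAlt (sp cs) t := by
  induction cs with
  | nil => intro t; simp [ankiAltGo, sp, joinAlt]
  | cons c cs ih =>
    intro t
    by_cases hc : c = '$'
    · subst hc
      rcases hsp : sp cs with _ | ⟨h0, t0⟩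
      · exact absurd hsp (sp_ne_nil cs)
      · simp [ankiAltGo, sp, hsp, joinAlt, ih]
    · rcases hsp : sp cs with _ | ⟨h0, t0⟩
      · exact absurd hsp (sp_ne_nil cs)
      · cases t0 with
        | nil => simp [ankiAltGo, sp, hc, hsp, joinAlt, ih]
        | cons q qs => simp [ankiAltGo, sp, hc, hsp, joinAlt, ih]

-- ===== VERDICT (by name: the statement is the Claim_ definition above) =====
theorem anki_format_spec : Claim_equal_anki_format := by
  intro input _
  unfold Spec_anki_format anki_format anki_format_alt
  simp only [splitOn_eq_sp]
  rw [show (fun (out : List Char) (p : Int × List Char) =>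
        out ++ p.2 ++
          (if p.1 = ((sp input.toList).length : Int) - 1 then []
           else if PySem.Int.mod p.1 2 = 0 then ['[', '$', ']']
           else ['[', '/', '$', ']'])) =
      (fun out p => out ++ p.2 ++ delimA ((sp input.toList).length : Int) p.1) from rfl]
  rw [foldl_enum_eq_joinIdx, joinIdx_eq_joinAlt _ _ 0 le_rfl (by simp),
      altGo_eq_joinAlt]
  simp
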